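-- pv_equiv track=rewrite | github.com/c-goldschmidt/AoC_2018 | days/day21.py | run_operation
-- ===== SOURCE A (Python) =====
-- def run_operation(registers):
--     a, b, c, d, e, f = registers
--
--     while True:
--         b = d & 255
--         f = f + b
--         f = f & 16777215
--         f = f * 65899
--         f = f & 16777215
--
--         b = int(256 > d)
--         if b:
--             break
--
--         d = d // 256
--
--     return [a, b, c, d, e, f]
-- ===== SOURCE B (Python) =====
-- def run_operation(registers):
--     a, b, c, d, e, f = registers
--     g, m = 65899, 1 << 24
--     # closed form: the hash is a base-65899 weighted sum of d's byte chunks mod 2**24,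
--     # so each term is computed independently (no loop-carried hash state) and summed.
--     k = (d.bit_length() - 1) // 8 if d >= 256 else 0
--     total = f * pow(g, k + 1, m) + sum(
--         ((d >> (8 * i)) & 255) * pow(g, k + 1 - i, m) for i in range(k + 1)
--     )
--     return [a, 1, c, d >> (8 * k), e, total % m]
-- ===== Notes on version B (the rewrite author's own statement) =====
-- stated objective: alternative
-- what changed: A's sequential loop carrying the hash state through each byte of d is replaced by a closed form: the hash is a base-65899 weighted sum of d's byte chunks mod 2^24, so B computes the chunk count from d.bit_length(), evaluates each term ((d >> 8i) & 255) * pow(65899, k+1-i, 2^24) independently, and sums; b is the constant 1 A always ends with.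
import Mathlib
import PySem

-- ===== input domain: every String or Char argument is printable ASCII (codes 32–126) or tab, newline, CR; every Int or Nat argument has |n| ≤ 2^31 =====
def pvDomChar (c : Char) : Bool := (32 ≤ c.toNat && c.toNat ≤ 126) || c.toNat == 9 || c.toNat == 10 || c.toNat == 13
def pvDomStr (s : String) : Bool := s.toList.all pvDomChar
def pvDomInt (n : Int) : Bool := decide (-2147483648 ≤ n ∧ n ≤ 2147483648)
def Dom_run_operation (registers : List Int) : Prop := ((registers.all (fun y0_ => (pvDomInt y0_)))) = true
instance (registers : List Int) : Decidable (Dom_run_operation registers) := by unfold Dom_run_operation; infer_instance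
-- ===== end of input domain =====

-- B replaces A's loop-carried hash state by the closed form: the hash is a base-65899
-- weighted sum of d's byte chunks mod 2^24, each term computed independently ('alternative').

-- ===== PORT A =====
-- A's while-loop: state (d, f); returns the final (b, d, f); b = int(256 > d) is 1 exactly
-- when the loop breaks, so the break branch returns b = 1.
def runLoopA (d f : Int) : Int × Int × Int :=
  let b := PySem.Int.band d 255
  let f := PySem.Int.band (f + b) 16777215
  let f := PySem.Int.band (f * 65899) 16777215
  if 256 > d then (1, d, f)                      -- b = int(256 > d); if b: break
  else runLoopA (PySem.Int.floordiv d 256) f     -- d = d // 256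
termination_by d.toNat
decreasing_by rw [PySem.Int.floordiv_eq_ediv_of_pos (by norm_num)]; omega

def run_operation (registers : List Int) : List Int :=
  match registers with
  | [a, _b, c, d, e, f] =>
    match runLoopA d f with
    | (b', d', f') => [a, b', c, d', e, f']
  | _ => []   -- a, b, c, d, e, f = registers raises unless len = 6 (excluded by Pre_)

-- ===== PORT B =====
-- chunk i of Source B's sum: ((d >> (8*i)) & 255) * pow(g, k+1-i, m)
def chunkTerm (d : Int) (k i : Nat) : Int :=
  PySem.Int.band (d >>> (8 * i)) 255 * PySem.Int.powMod 65899 (k + 1 - i) 16777216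

-- a, b, c, d, e, f = registers (raises unless len = 6; excluded by Pre_, so [] otherwise)
def run_operation_alt (registers : List Int) : List Int :=
  match registers with
  | [] => []
  | a :: rest =>
    match rest with
    | [] => []
    | _b :: rest =>
      match rest with
      | [] => []
      | c :: rest =>
        match rest with
        | [] => []
        | d :: rest =>
          match rest with
          | [] => []
          | e :: rest =>
            match rest with
            | [] => []
            | f :: rest =>
              match rest with
              | _ :: _ => []
              | [] =>
                -- k = (d.bit_length() - 1) // 8 if d >= 256 else 0 (Nat division: bit_length ≥ 9 here)
                let k : Nat := if 256 ≤ d then (PySem.Int.bitLength d - 1) / 8 else 0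
                let total : Int :=
                  f * PySem.Int.powMod 65899 (k + 1) 16777216
                    + ((List.range (k + 1)).map (chunkTerm d k)).sum
                [a, 1, c, d >>> (8 * k), e, PySem.Int.mod total 16777216]

-- ===== PRECONDITION & SPEC =====
-- A unpacks the list into six variables: any other length raises ValueError.
def Pre_run_operation (registers : List Int) : Prop := registers.length = 6
instance (registers : List Int) : Decidable (Pre_run_operation registers) := by
  unfold Pre_run_operation; infer_instance
def pvWitness_run_operation : List Int := [0, 0, 0, 0, 0, 0]

def Spec_run_operation (registers : List Int) (out : List Int) : Prop := out = run_operation_alt registers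
instance (registers : List Int) (out : List Int) : Decidable (Spec_run_operation registers out) := by unfold Spec_run_operation; infer_instance

-- ===== CLAIM (what is proved, stated in full; the proofs are below) =====
def Claim_equal_run_operation : Prop := ∀ (registers : List Int), Dom_run_operation registers → Pre_run_operation registers → Spec_run_operation registers (run_operation registers)

-- ===== LEMMAS AND PROOFS =====
-- B's k, as a named function for the proofs
def kFun (d : Int) : Nat := if 256 ≤ d then (PySem.Int.bitLength d - 1) / 8 else 0

-- band with the all-ones masks is emod
theorem band_255 (x : Int) : PySem.Int.band x 255 = x % 256 := by
  unfold PySem.Int.band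
  by_cases hx : 0 ≤ x
  · rw [if_pos hx, if_pos (show (0:Int) ≤ 255 by norm_num)]
    rw [show (255:Int).toNat = 255 from rfl]
    have h := Nat.and_two_pow_sub_one_eq_mod x.toNat 8
    norm_num at h
    omega
  · rw [if_neg hx, if_pos (show (0:Int) ≤ 255 by norm_num)]
    rw [show (255:Int).toNat = 255 from rfl,
        show (-x-1).toNat = (-x).toNat - 1 from by omega]
    have h := Nat.and_two_pow_sub_one_eq_mod ((-x).toNat - 1) 8
    rw [Nat.and_comm] at h
    norm_num at h
    omega

theorem band_mask24 (x : Int) : PySem.Int.band x 16777215 = x % 16777216 := by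
  unfold PySem.Int.band
  by_cases hx : 0 ≤ x
  · rw [if_pos hx, if_pos (show (0:Int) ≤ 16777215 by norm_num)]
    rw [show (16777215:Int).toNat = 16777215 from rfl]
    have h := Nat.and_two_pow_sub_one_eq_mod x.toNat 24
    norm_num at h
    omega
  · rw [if_neg hx, if_pos (show (0:Int) ≤ 16777215 by norm_num)]
    rw [show (16777215:Int).toNat = 16777215 from rfl,
        show (-x-1).toNat = (-x).toNat - 1 from by omega]
    have h := Nat.and_two_pow_sub_one_eq_mod ((-x).toNat - 1) 24
    rw [Nat.and_comm] at h
    norm_num at h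
    omega

-- the chunk count follows the loop: one more chunk for d ≥ 256 than for d // 256
theorem kFun_rec (d : Int) (hd : 256 ≤ d) :
    kFun d = kFun (PySem.Int.floordiv d 256) + 1 := by
  rw [PySem.Int.floordiv_eq_ediv_of_pos (by norm_num)]
  set q : Int := d / 256 with hq
  have hq1 : 1 ≤ q := by omega
  have hL1 := PySem.Int.two_pow_bitLength_le d (by omega)
  have hL2 := PySem.Int.lt_two_pow_bitLength d
  have hM1 := PySem.Int.two_pow_bitLength_le q (by omega)
  have hM2 := PySem.Int.lt_two_pow_bitLength q
  set L := PySem.Int.bitLength d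
  set L' := PySem.Int.bitLength q
  have habs : q.natAbs = d.natAbs / 256 := by omega
  -- 2^(L'+7) ≤ d.natAbs < 2^L  and  2^(L-1) ≤ d.natAbs < 2^(L'+8)
  have hup : d.natAbs < 2 ^ (L' + 8) := by
    have : d.natAbs / 256 < 2 ^ L' := habs ▸ hM2
    have := (Nat.div_lt_iff_lt_mul (by norm_num : 0 < 256)).mp this
    calc d.natAbs < 2 ^ L' * 256 := this
      _ = 2 ^ (L' + 8) := by ring
  have hlo : 2 ^ (L' + 7) ≤ d.natAbs := by
    have h3 : 2 ^ (L' - 1) ≤ d.natAbs / 256 := habs ▸ hM1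
    have h4 := (Nat.le_div_iff_mul_le (by norm_num : 0 < 256)).mp h3
    have hL'1 : 1 ≤ L' := by
      by_contra hc
      interval_cases L'
      omega
    calc 2 ^ (L' + 7) = 2 ^ (L' - 1) * 256 := by
          rw [show L' + 7 = (L' - 1) + 8 by omega]; ring
      _ ≤ d.natAbs := h4
  have hgt : L' + 7 < L := by
    have := lt_of_le_of_lt hlo hL2
    exact (Nat.pow_lt_pow_iff_right (by norm_num : 1 < 2)).mp this
  have hlt : L - 1 < L' + 8 := by
    have := lt_of_le_of_lt hL1 hup
    exact (Nat.pow_lt_pow_iff_right (by norm_num : 1 < 2)).mp this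
  have hL9 : 9 ≤ L := by
    have h256 : 256 ≤ d.natAbs := by omega
    have h8 : (2:Nat) ^ 8 = 256 := by norm_num
    have hlt8 : (2:Nat) ^ 8 < 2 ^ L := by omega
    have := (Nat.pow_lt_pow_iff_right (by norm_num : 1 < 2)).mp hlt8
    omega
  have hLL : L = L' + 8 := by omega
  unfold kFun
  rw [if_pos hd]
  by_cases hq256 : 256 ≤ q
  · rw [if_pos hq256]
    have hL'9 : 9 ≤ L' := by
      have h256 : 256 ≤ q.natAbs := by omega
      have h8 : (2:Nat) ^ 8 = 256 := by norm_num
      have hlt8 : (2:Nat) ^ 8 < 2 ^ L' := by omega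
      have := (Nat.pow_lt_pow_iff_right (by norm_num : 1 < 2)).mp hlt8
      omega
    omega
  · rw [if_neg hq256]
    have hL'8 : L' ≤ 8 := by
      have hqabs : q.natAbs < 256 := by omega
      by_contra hc
      have : (2:Nat) ^ 8 ≤ 2 ^ (L' - 1) :=
        (Nat.pow_le_pow_iff_right (by norm_num : 1 < 2)).mpr (by omega)
      omega
    omega

-- shifting past the low byte commutes with d // 256
theorem shift_succ (d : Int) (i : Nat) :
    d >>> (8 * (i + 1)) = (PySem.Int.floordiv d 256) >>> (8 * i) := by
  rw [PySem.Int.floordiv_eq_ediv_of_pos (by norm_num)]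
  rw [Int.shiftRight_eq_div_pow, Int.shiftRight_eq_div_pow]
  rw [Int.ediv_ediv_of_nonneg (by norm_num : (0:Int) ≤ 256)]
  congr 1
  push_cast
  ring

theorem chunkTerm_succ (d : Int) (k i : Nat) :
    chunkTerm d (k + 1) (i + 1) = chunkTerm (PySem.Int.floordiv d 256) k i := by
  unfold chunkTerm
  rw [shift_succ, show k + 1 + 1 - (i + 1) = k + 1 - i from by omega]

-- powMod is congruent to the plain power
theorem powMod_modEq (e : Nat) :
    PySem.Int.powMod 65899 e 16777216 ≡ 65899 ^ e [ZMOD 16777216] := by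
  unfold PySem.Int.powMod
  rw [PySem.Int.mod_eq_emod_of_pos (by norm_num)]
  exact Int.emod_emod_of_dvd _ dvd_rfl

-- one hash step folded into the closed-form weighted sum
theorem hash_step_mod (f c S : Int) (k : Nat) :
    (((f + c) % 16777216 * 65899) % 16777216 * PySem.Int.powMod 65899 (k + 1) 16777216 + S)
        % 16777216
      = (f * PySem.Int.powMod 65899 (k + 2) 16777216
          + (c * PySem.Int.powMod 65899 (k + 2) 16777216 + S)) % 16777216 := by
  have A1 : (f + c) % 16777216 ≡ f + c [ZMOD 16777216] := Int.emod_emod_of_dvd _ dvd_rfl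
  have A2 : (f + c) % 16777216 * 65899 ≡ (f + c) * 65899 [ZMOD 16777216] := A1.mul_right _
  have A3 : ((f + c) % 16777216 * 65899) % 16777216 ≡ (f + c) * 65899 [ZMOD 16777216] :=
    (Int.emod_emod_of_dvd _ dvd_rfl).trans A2
  have A4 : ((f + c) % 16777216 * 65899) % 16777216 * PySem.Int.powMod 65899 (k + 1) 16777216 + S
      ≡ (f + c) * 65899 * 65899 ^ (k + 1) + S [ZMOD 16777216] :=
    (A3.mul (powMod_modEq (k + 1))).add_right S
  have B1 : f * PySem.Int.powMod 65899 (k + 2) 16777216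
        + (c * PySem.Int.powMod 65899 (k + 2) 16777216 + S)
      ≡ f * 65899 ^ (k + 2) + (c * 65899 ^ (k + 2) + S) [ZMOD 16777216] :=
    ((Int.ModEq.refl f).mul (powMod_modEq (k + 2))).add
      (((Int.ModEq.refl c).mul (powMod_modEq (k + 2))).add_right S)
  have hring : (f + c) * 65899 * 65899 ^ (k + 1) + S
      = f * 65899 ^ (k + 2) + (c * 65899 ^ (k + 2) + S) := by ring
  refine A4.trans ?_
  rw [hring]
  exact B1.symm

-- the final hash step (d < 256): one chunk, weight 65899
theorem hash_base_mod (f c : Int) :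
    ((f + c) % 16777216 * 65899) % 16777216
      = (f * 65899 + c * 65899) % 16777216 := by
  have A1 : (f + c) % 16777216 ≡ f + c [ZMOD 16777216] := Int.emod_emod_of_dvd _ dvd_rfl
  have A2 : (f + c) % 16777216 * 65899 ≡ (f + c) * 65899 [ZMOD 16777216] := A1.mul_right _
  have hring : (f + c) * 65899 = f * 65899 + c * 65899 := by ring
  rw [hring] at A2
  exact A2

-- the loop equals B's closed form
theorem runLoopA_closed (d f : Int) :
    runLoopA d f =
      (1, d >>> (8 * kFun d),
        PySem.Int.mod
          (f * PySem.Int.powMod 65899 (kFun d + 1) 16777216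
            + ((List.range (kFun d + 1)).map (chunkTerm d (kFun d))).sum)
          16777216) := by
  fun_induction runLoopA d f with
  | case1 d f b f1 f2 h =>
    have hk : kFun d = 0 := by unfold kFun; rw [if_neg (by omega)]
    have hc0 : chunkTerm d 0 0 = d % 256 * PySem.Int.powMod 65899 1 16777216 := by
      unfold chunkTerm
      rw [show 8 * 0 = 0 from rfl, Int.shiftRight_eq_div_pow]
      norm_num [band_255]
    rw [hk]
    have hsum : (List.map (chunkTerm d 0) (List.range (0 + 1))).sum
        = d % 256 * 65899 := by
      rw [show (0 : Nat) + 1 = 1 from rfl, List.range_one, List.map_cons, List.map_nil,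
        List.sum_cons, List.sum_nil, hc0,
        show PySem.Int.powMod 65899 1 16777216 = 65899 from rfl, add_zero]
    simp only [PySem.Int.mod_eq_emod_of_pos (show (0:Int) < 16777216 by norm_num), hsum]
    refine Prod.ext rfl (Prod.ext ?_ ?_) <;> simp only
    · rw [show 8 * 0 = 0 from rfl, Int.shiftRight_eq_div_pow]
      norm_num
    · simp only [b, f1, f2, band_255, band_mask24]
      exact hash_base_mod f (d % 256)
  | case2 d f b f1 f2 h ih =>
    have hd : 256 ≤ d := by omega
    rw [ih, kFun_rec d hd]
    simp only [PySem.Int.mod_eq_emod_of_pos (show (0:Int) < 16777216 by norm_num)]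
    set q : Int := PySem.Int.floordiv d 256 with hq
    set k : Nat := kFun q with hk
    refine Prod.ext rfl (Prod.ext ?_ ?_) <;> simp only
    · -- the returned d: q >>> 8k = d >>> 8(k+1)
      rw [← shift_succ]
    · -- the hash value
      have hsum : ((List.range (k + 1 + 1)).map (chunkTerm d (k + 1))).sum
          = chunkTerm d (k + 1) 0 + ((List.range (k + 1)).map (chunkTerm q k)).sum := by
        rw [List.range_succ_eq_map, List.map_cons, List.sum_cons, List.map_map]
        congr 1
        apply congrArg
        apply List.map_congr_left
        intro i _
        exact chunkTerm_succ d k i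
      rw [hsum]
      have hc0 : chunkTerm d (k + 1) 0 = d % 256 * PySem.Int.powMod 65899 (k + 2) 16777216 := by
        unfold chunkTerm
        rw [show 8 * 0 = 0 from rfl, Int.shiftRight_eq_div_pow]
        norm_num [band_255]
      rw [hc0]
      simp only [b, f1, f2, band_255, band_mask24]
      exact hash_step_mod f (d % 256) _ k

-- ===== VERDICT (by name: the statement is the Claim_ definition above) =====
theorem run_operation_spec : Claim_equal_run_operation := by
  intro registers _ hpre
  unfold Pre_run_operation at hpre
  match registers, hpre with
  | [a, b, c, d, e, f], _ =>
    unfold Spec_run_operation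
    simp only [run_operation, run_operation_alt, runLoopA_closed]
    rfl
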